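-- pv_equiv track=rewrite | github.com/curibe/i18n-scripts | i18n_set_label.py | create_collection
-- ===== SOURCE A (Python) =====
-- def create_collection(attr_content,loc_repeated):
--     array = []
--     i = 0
--     olditem=''
--     for item,loc in loc_repeated:
--         if item != olditem:
--             i=0
--         array.append((i,item,loc))
--         olditem=item
--         i+=1
--     return array
-- ===== SOURCE B (Python) =====
-- def create_collection(attr_content, loc_repeated):
--     out = []
--     rest = loc_repeated
--     while rest:
--         key = rest[0][0]
--         k = 0
--         while k < len(rest) and rest[k][0] == key:
--             k += 1
--         out.extend((i, item, loc) for i, (item, loc) in enumerate(rest[:k]))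
--         rest = rest[k:]
--     return out
-- ===== Notes on version B (the rewrite author's own statement) =====
-- stated objective: alternative
-- what changed: Replaces A's flat loop with an olditem/counter state machine by explicit detection of maximal runs of equal keys and local enumeration of each run (nested loop over groups).
import Mathlib
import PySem

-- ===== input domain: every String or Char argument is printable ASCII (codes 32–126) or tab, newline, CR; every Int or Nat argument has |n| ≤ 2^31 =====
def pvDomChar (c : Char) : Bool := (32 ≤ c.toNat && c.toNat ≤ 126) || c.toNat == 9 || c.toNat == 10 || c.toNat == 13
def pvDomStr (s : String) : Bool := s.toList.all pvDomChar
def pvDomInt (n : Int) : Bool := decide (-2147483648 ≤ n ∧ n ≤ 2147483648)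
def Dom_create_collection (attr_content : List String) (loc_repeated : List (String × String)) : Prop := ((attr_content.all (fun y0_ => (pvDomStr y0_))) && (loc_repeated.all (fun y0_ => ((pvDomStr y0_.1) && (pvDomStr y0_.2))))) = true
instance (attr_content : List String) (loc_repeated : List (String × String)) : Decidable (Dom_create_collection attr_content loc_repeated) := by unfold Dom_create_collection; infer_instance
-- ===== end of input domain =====

-- B replaces A's olditem/counter state machine by explicit run detection plus per-run enumeration (alternative decomposition, same cost); attr_content is unused by both, as in the Python.

-- ===== PORT A =====
-- flat loop with state (array, i, olditem), as in Source A
def create_collection (attr_content : List String) (loc_repeated : List (String × String)) : List (Int × String × String) :=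
  (loc_repeated.foldl
    (fun (st : List (Int × String × String) × Int × String) (p : String × String) =>
      let i : Int := if p.1 ≠ st.2.2 then 0 else st.2.1
      (st.1 ++ [(i, p.1, p.2)], i + 1, p.1))
    ([], 0, "")).1

-- ===== PORT B =====
-- inner while: length of the maximal prefix of l whose keys equal `key`
def takeRunLen (key : String) : List (String × String) → Nat
  | [] => 0
  | x :: xs => if x.1 == key then takeRunLen key xs + 1 else 0

-- outer while: peel one run at a time, enumerate it locally, accumulate into out
def ccLoop (out : List (Int × String × String)) (l : List (String × String)) : List (Int × String × String) :=
  match l with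
  | [] => out
  | x :: rest' =>
    let k := takeRunLen x.1 (x :: rest')
    ccLoop (out ++ (PySem.List.enumerate ((x :: rest').take k) 0).map (fun p => (p.1, p.2.1, p.2.2)))
           ((x :: rest').drop k)
termination_by l.length
decreasing_by
  simp only [takeRunLen, BEq.rfl, if_true, List.length_drop, List.length_cons]
  omega

def create_collection_alt (attr_content : List String) (loc_repeated : List (String × String)) : List (Int × String × String) :=
  ccLoop [] loc_repeated

-- ===== PRECONDITION & SPEC =====
def Spec_create_collection (attr_content : List String) (loc_repeated : List (String × String)) (out : List (Int × String × String)) : Prop := out = create_collection_alt attr_content loc_repeated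
instance (attr_content : List String) (loc_repeated : List (String × String)) (out : List (Int × String × String)) : Decidable (Spec_create_collection attr_content loc_repeated out) := by unfold Spec_create_collection; infer_instance

-- ===== CLAIM (what is proved, stated in full; the proofs are below) =====
def Claim_equal_create_collection : Prop := ∀ (attr_content : List String) (loc_repeated : List (String × String)), Dom_create_collection attr_content loc_repeated → Spec_create_collection attr_content loc_repeated (create_collection attr_content loc_repeated)

-- ===== LEMMAS AND PROOFS =====

-- A's loop body, named, and its recursive characterisation
def stepA (st : List (Int × String × String) × Int × String) (p : String × String) :
    List (Int × String × String) × Int × String :=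
  let i : Int := if p.1 ≠ st.2.2 then 0 else st.2.1
  (st.1 ++ [(i, p.1, p.2)], i + 1, p.1)

def runA (old : String) (i : Int) : List (String × String) → List (Int × String × String)
  | [] => []
  | x :: t =>
    let j : Int := if x.1 ≠ old then 0 else i
    (j, x.1, x.2) :: runA x.1 (j + 1) t

lemma foldA_eq_runA (l : List (String × String)) :
    ∀ (acc : List (Int × String × String)) (i : Int) (old : String),
      (l.foldl stepA (acc, i, old)).1 = acc ++ runA old i l := by
  induction l with
  | nil => intro acc i old; simp [runA]
  | cons x t ih =>
    intro acc i old
    simp only [List.foldl_cons, stepA, runA, ih, List.append_assoc, List.singleton_append]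

lemma ccLoop_acc (n : Nat) : ∀ (l : List (String × String)), l.length ≤ n →
    ∀ out, ccLoop out l = out ++ ccLoop [] l := by
  induction n with
  | zero =>
    intro l hl out
    match l with
    | [] => simp [ccLoop]
    | x :: t => simp at hl
  | succ n ih =>
    intro l hl out
    match l with
    | [] => simp [ccLoop]
    | x :: t =>
      rw [ccLoop, ccLoop]
      have hk : takeRunLen x.1 (x :: t) = takeRunLen x.1 t + 1 := by
        simp [takeRunLen]
      rw [hk]
      have hlen : ((x :: t).drop (takeRunLen x.1 t + 1)).length ≤ n := by
        simp only [List.length_drop, List.length_cons]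
        simp only [List.length_cons] at hl
        omega
      rw [List.nil_append]
      conv_lhs => rw [ih _ hlen]
      conv_rhs => rw [ih _ hlen]
      rw [List.append_assoc]

-- the heart: runA over a list splits at the maximal run of `k`
lemma runA_eq (l : List (String × String)) :
    ∀ (k : String) (i : Int),
      runA k i l =
        (PySem.List.enumerate (l.take (takeRunLen k l)) i).map (fun p => (p.1, p.2.1, p.2.2))
          ++ ccLoop [] (l.drop (takeRunLen k l)) := by
  induction l with
  | nil => intro k i; show ([] : List (Int × String × String)) = _; simp [takeRunLen, ccLoop]
  | cons x t ih =>
    intro k i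
    by_cases h : x.1 = k
    · have hk : takeRunLen k (x :: t) = takeRunLen k t + 1 := by
        simp [takeRunLen, h]
      rw [hk]
      simp only [List.take_succ_cons, List.drop_succ_cons, PySem.List.enumerate_cons,
        List.map_cons, runA, h]
      simp only [ne_eq, not_true_eq_false, if_false, ih k (i + 1), List.cons_append]
    · have hk : takeRunLen k (x :: t) = 0 := by
        simp [takeRunLen, h]
      rw [hk]
      simp only [List.take_zero, List.drop_zero, PySem.List.enumerate_nil, List.map_nil,
        List.nil_append]
      rw [ccLoop]
      have hk' : takeRunLen x.1 (x :: t) = takeRunLen x.1 t + 1 := by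
        simp [takeRunLen]
      rw [hk', ccLoop_acc (t.length) _ (by simp only [List.length_drop, List.length_cons]; omega)]
      simp only [runA, ne_eq, h, not_false_eq_true, if_true, List.take_succ_cons,
        List.drop_succ_cons, PySem.List.enumerate_cons, List.map_cons, List.nil_append,
        List.cons_append, ih x.1 1, zero_add]

lemma runA_zero (l : List (String × String)) (k : String) :
    runA k 0 l = ccLoop [] l := by
  match l with
  | [] => simp [runA, ccLoop]
  | x :: t =>
    rw [ccLoop]
    have hk' : takeRunLen x.1 (x :: t) = takeRunLen x.1 t + 1 := by
      simp [takeRunLen]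
    rw [hk', ccLoop_acc (t.length) _ (by simp only [List.length_drop, List.length_cons]; omega)]
    simp only [runA, List.take_succ_cons, List.drop_succ_cons, PySem.List.enumerate_cons,
      List.map_cons, List.nil_append, List.cons_append, runA_eq t x.1, zero_add]
    split_ifs <;> simp

-- ===== VERDICT (by name: the statement is the Claim_ definition above) =====
theorem create_collection_spec : Claim_equal_create_collection := by
  intro attr_content loc_repeated _
  show create_collection attr_content loc_repeated = create_collection_alt attr_content loc_repeated
  unfold create_collection create_collection_alt
  rw [show (fun (st : List (Int × String × String) × Int × String) (p : String × String) =>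
      let i : Int := if p.1 ≠ st.2.2 then 0 else st.2.1
      (st.1 ++ [(i, p.1, p.2)], i + 1, p.1)) = stepA from rfl]
  rw [foldA_eq_runA, runA_zero, List.nil_append]
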